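-- pv_equiv track=rewrite | github.com/AP-MI-2021/lab-3-GaleaMihai | main.py | get_longest_sublist_same_bin
-- ===== SOURCE A (Python) =====
-- def is_all_same_bin(lst):
--     """
--     Verifica daca toate elementele dintr-o lista au aceeasi lungime in reprezentarea binara.
--     :param lst: lista data
--     :return: true daca da, false daca nu
--     """
--     for i in range(len(lst)):
--         for j in range(i, len(lst)):
--             if len(bin(lst[i])) != len(bin(lst[j])):
--                 return False
--     return True
--
-- def get_longest_sublist_same_bin(lst):
--     """
--     Determina cea mai lunga subsecventa cu toate elementele care au aceeasi lungime in reprezentarea binara.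
--     :param lst: lista data
--     :return: o lista reprezentand prima cea mai lunga subsecventa
--     """
--     result = []
--     for i in range(len(lst)):
--         for j in range(i, len(lst)):
--             considered = lst[i:j+1]
--             if is_all_same_bin(considered):
--                 if len(considered) > len(result):
--                     result = considered
--     return result
-- ===== SOURCE B (Python) =====
-- def get_longest_sublist_same_bin(lst):
--     """Single left-to-right pass over maximal runs of equal bin-length; keeps the first longest run."""
--     best = []
--     i = 0
--     n = len(lst)
--     while i < n:
--         b = len(bin(lst[i]))
--         j = i + 1
--         while j < n and len(bin(lst[j])) == b:
--             j += 1
--         if j - i > len(best):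
--             best = lst[i:j]
--         i = j
--     return best
-- ===== Notes on version B (the rewrite author's own statement) =====
-- stated objective: faster
-- what changed: Replaced the quadruple-nested scan (all O(n^2) slices, each checked pairwise in O(m^2)) by a single linear pass that walks maximal runs of equal bin-length and keeps the first longest run.
import Mathlib
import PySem

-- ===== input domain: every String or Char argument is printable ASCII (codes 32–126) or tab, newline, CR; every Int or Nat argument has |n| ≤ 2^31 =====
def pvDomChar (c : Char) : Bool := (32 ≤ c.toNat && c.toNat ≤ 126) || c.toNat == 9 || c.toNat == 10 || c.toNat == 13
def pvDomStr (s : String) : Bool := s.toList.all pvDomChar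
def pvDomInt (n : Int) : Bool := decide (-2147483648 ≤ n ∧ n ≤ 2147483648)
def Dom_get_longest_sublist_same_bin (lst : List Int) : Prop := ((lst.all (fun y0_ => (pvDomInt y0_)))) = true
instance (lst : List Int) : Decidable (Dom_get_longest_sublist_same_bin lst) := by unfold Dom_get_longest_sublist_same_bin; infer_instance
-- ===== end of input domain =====

-- B replaces A's quadruple-nested slice scan by one linear pass over maximal runs of
-- equal bin-length, keeping the first longest run (objective: faster).


-- len(bin(x)) — used verbatim by both Python versions
def pvKey (x : Int) : Int := PySem.Str.len (PySem.Int.pyBin x)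

-- ===== PORT A =====
-- helper is_all_same_bin: nested index loops with early `return False` (ported as .all)
def is_all_same_bin (lst : List Int) : Bool :=
  (PySem.List.pyRange 0 (lst.length : Int) 1).all (fun i =>
    (PySem.List.pyRange i (lst.length : Int) 1).all (fun j =>
      pvKey (PySem.List.pyGetD lst i 0) == pvKey (PySem.List.pyGetD lst j 0)))

def get_longest_sublist_same_bin (lst : List Int) : List Int :=
  (PySem.List.pyRange 0 (lst.length : Int) 1).foldl (fun result i =>
    (PySem.List.pyRange i (lst.length : Int) 1).foldl (fun result j =>
      let considered := PySem.List.slice lst (some i) (some (j + 1))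
      if is_all_same_bin considered then
        if considered.length > result.length then considered else result
      else result) result) []

-- ===== PORT B =====
-- inner while loop of Source B: split off the prefix with key b, return (run-tail, rest)
def pvTakeRun (b : Int) : List Int → List Int × List Int
  | [] => ([], [])
  | y :: ys =>
    if pvKey y == b then
      let p := pvTakeRun b ys
      (y :: p.1, p.2)
    else ([], y :: ys)

theorem pvTakeRun_snd_length_le (b : Int) (ys : List Int) :
    (pvTakeRun b ys).2.length ≤ ys.length := by
  induction ys with
  | nil => simp [pvTakeRun]
  | cons y ys ih =>
    simp only [pvTakeRun]
    split
    · simpa using Nat.le_succ_of_le ih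
    · simp

-- outer while loop of Source B
def pvScan (best : List Int) : List Int → List Int
  | [] => best
  | x :: xs =>
    let p := pvTakeRun (pvKey x) xs
    let run := x :: p.1
    pvScan (if run.length > best.length then run else best) p.2
  termination_by l => l.length
  decreasing_by
    simpa using Nat.lt_succ_of_le (pvTakeRun_snd_length_le (pvKey x) xs)

def get_longest_sublist_same_bin_alt (lst : List Int) : List Int :=
  pvScan [] lst

-- ===== PRECONDITION & SPEC =====
def Spec_get_longest_sublist_same_bin (lst : List Int) (out : List Int) : Prop := out = get_longest_sublist_same_bin_alt lst
instance (lst : List Int) (out : List Int) : Decidable (Spec_get_longest_sublist_same_bin lst out) := by unfold Spec_get_longest_sublist_same_bin; infer_instance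

-- ===== CLAIM (what is proved, stated in full; the proofs are below) =====
def Claim_equal_get_longest_sublist_same_bin : Prop := ∀ (lst : List Int), Dom_get_longest_sublist_same_bin lst → Spec_get_longest_sublist_same_bin lst (get_longest_sublist_same_bin lst)

-- ===== LEMMAS AND PROOFS =====

-- length of the maximal same-key run at the head of a list
def pvRunLen : List Int → Nat
  | [] => 0
  | x :: xs => 1 + (xs.takeWhile (fun y => pvKey y == pvKey x)).length

-- A's update step on a candidate slice, and the net effect of A's inner loop
def pvStep (zs res : List Int) : List Int :=
  if is_all_same_bin zs then
    if zs.length > res.length then zs else res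
  else res

def pvF (ys res : List Int) : List Int :=
  if pvRunLen ys > res.length then ys.take (pvRunLen ys) else res

theorem pvRunLen_le (ys : List Int) : pvRunLen ys ≤ ys.length := by
  cases ys with
  | nil => simp [pvRunLen]
  | cons x xs =>
    have := (List.takeWhile_sublist (p := fun y => pvKey y == pvKey x) (l := xs)).length_le
    simp only [pvRunLen, List.length_cons]; omega

theorem is_all_same_iff (zs : List Int) :
    is_all_same_bin zs = true ↔ ∀ y ∈ zs, ∀ z ∈ zs, pvKey y = pvKey z := by
  simp only [is_all_same_bin, List.all_eq_true, PySem.List.mem_pyRange_one, beq_iff_eq, and_imp]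
  constructor
  · intro h y hy z hz
    obtain ⟨p, hp, rfl⟩ := List.mem_iff_getElem.mp hy
    obtain ⟨q, hq, rfl⟩ := List.mem_iff_getElem.mp hz
    rcases Nat.lt_or_ge q p with hpq | hpq
    · have := h (q : Int) (by positivity) (by exact_mod_cast hq) (p : Int)
        (by exact_mod_cast hpq.le) (by exact_mod_cast hp)
      rw [PySem.List.pyGetD_natCast, PySem.List.pyGetD_natCast] at this
      rw [List.getD_eq_getElem _ _ hp, List.getD_eq_getElem _ _ hq] at this
      exact this.symm
    · have := h (p : Int) (by positivity) (by exact_mod_cast hp) (q : Int)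
        (by exact_mod_cast hpq) (by exact_mod_cast hq)
      rw [PySem.List.pyGetD_natCast, PySem.List.pyGetD_natCast] at this
      rwa [List.getD_eq_getElem _ _ hp, List.getD_eq_getElem _ _ hq] at this
  · intro h i hi0 hin j hij hjn
    obtain ⟨p, rfl⟩ : ∃ p : Nat, i = (p : Int) := ⟨i.toNat, by omega⟩
    obtain ⟨q, rfl⟩ : ∃ q : Nat, j = (q : Int) := ⟨j.toNat, by omega⟩
    have hp : p < zs.length := by exact_mod_cast hin
    have hq : q < zs.length := by exact_mod_cast hjn
    rw [PySem.List.pyGetD_natCast, PySem.List.pyGetD_natCast,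
      List.getD_eq_getElem _ _ hp, List.getD_eq_getElem _ _ hq]
    exact h _ (List.getElem_mem hp) _ (List.getElem_mem hq)


theorem takeWhile_char (p : Int → Bool) (xs : List Int) (k : Nat) (hk : k ≤ xs.length) :
    (∀ y ∈ xs.take k, p y = true) ↔ k ≤ (xs.takeWhile p).length := by
  induction xs generalizing k with
  | nil => simp at hk; simp [hk]
  | cons x t ih =>
    cases k with
    | zero => simp
    | succ k =>
      simp only [List.take_succ_cons, List.takeWhile_cons, List.mem_cons]
      by_cases hx : p x = true
      · rw [if_pos hx, List.length_cons]
        have ihk := ih k (by simpa using hk)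
        constructor
        · intro h
          have := ihk.mp (fun y hy => h y (Or.inr hy))
          omega
        · intro h y hy
          rcases hy with rfl | hy
          · exact hx
          · exact ihk.mpr (by omega) y hy
      · simp only [if_neg hx, List.length_nil]
        constructor
        · intro h
          exact absurd (h x (Or.inl rfl)) hx
        · omega

theorem is_all_same_take_iff (ys : List Int) (m : Nat) (h1 : 1 ≤ m) (h2 : m ≤ ys.length) :
    (is_all_same_bin (ys.take m) = true ↔ m ≤ pvRunLen ys) := by
  obtain ⟨x, xs, rfl⟩ : ∃ x xs, ys = x :: xs := by
    cases ys with
    | nil => simp at h2; omega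
    | cons x xs => exact ⟨x, xs, rfl⟩
  obtain ⟨k, rfl⟩ : ∃ k, m = k + 1 := ⟨m - 1, by omega⟩
  rw [List.take_succ_cons, is_all_same_iff]
  have step1 : (∀ y ∈ x :: xs.take k, ∀ z ∈ x :: xs.take k, pvKey y = pvKey z)
      ↔ ∀ y ∈ xs.take k, pvKey y = pvKey x := by
    constructor
    · intro h y hy
      exact h y (List.mem_cons_of_mem _ hy) x (by simp)
    · intro h y hy z hz
      have ky : pvKey y = pvKey x := by
        rcases List.mem_cons.mp hy with rfl | hy
        · rfl
        · exact h y hy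
      have kz : pvKey z = pvKey x := by
        rcases List.mem_cons.mp hz with rfl | hz
        · rfl
        · exact h z hz
      rw [ky, kz]
  have step2 : (∀ y ∈ xs.take k, pvKey y = pvKey x)
      ↔ k ≤ (xs.takeWhile (fun y => pvKey y == pvKey x)).length := by
    rw [← takeWhile_char _ _ k (by simpa using h2)]
    simp
  rw [step1, step2, pvRunLen]
  omega

theorem inner_fold_eq (ys res : List Int) (N : Nat) (hN : N ≤ ys.length) :
    (List.range N).foldl (fun res t => pvStep (ys.take (t + 1)) res) res
      = if min N (pvRunLen ys) > res.length then ys.take (min N (pvRunLen ys)) else res := by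
  induction N with
  | zero => simp
  | succ N ih =>
    rw [List.range_succ, List.foldl_append, ih (by omega)]
    have hr := pvRunLen_le ys
    by_cases hv : N + 1 ≤ pvRunLen ys
    · have hmN : min N (pvRunLen ys) = N := by omega
      have hmN1 : min (N + 1) (pvRunLen ys) = N + 1 := by omega
      have hvalid : is_all_same_bin (ys.take (N + 1)) = true :=
        (is_all_same_take_iff ys (N + 1) (by omega) (by omega)).mpr hv
      have hlenN : (ys.take N).length = N := by simp; omega
      have hlenN1 : (ys.take (N + 1)).length = N + 1 := by simp; omega
      rw [hmN, hmN1]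
      simp only [List.foldl_cons, List.foldl_nil, pvStep, hvalid, hlenN1]
      split_ifs with h1 h2 h3 h4 <;> first
        | rfl
        | (exfalso; rw [hlenN] at *; omega)
    · have hm : min N (pvRunLen ys) = pvRunLen ys := by omega
      have hm1 : min (N + 1) (pvRunLen ys) = pvRunLen ys := by omega
      have hinvalid : is_all_same_bin (ys.take (N + 1)) = false := by
        rcases Bool.eq_false_or_eq_true (is_all_same_bin (ys.take (N + 1))) with h | h
        · have := (is_all_same_take_iff ys (N + 1) (by omega) (by omega)).mp h
          omega
        · exact h
      rw [hm, hm1]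
      simp [List.foldl_cons, pvStep, hinvalid]

theorem pvTakeRun_eq (b : Int) (ys : List Int) :
    pvTakeRun b ys = (ys.takeWhile (fun y => pvKey y == b), ys.dropWhile (fun y => pvKey y == b)) := by
  induction ys with
  | nil => simp [pvTakeRun]
  | cons y ys ih =>
    simp only [pvTakeRun, List.takeWhile_cons, List.dropWhile_cons, ih]
    split <;> simp

theorem pvRunLen_tail (y : Int) (t : List Int) (h : 2 ≤ pvRunLen (y :: t)) :
    pvRunLen t = pvRunLen (y :: t) - 1 := by
  cases t with
  | nil => simp [pvRunLen] at h
  | cons z t' =>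
    simp only [pvRunLen, List.takeWhile_cons] at h ⊢
    by_cases hz : (pvKey z == pvKey y) = true
    · have hkey : pvKey z = pvKey y := beq_iff_eq.mp hz
      have hpred : (fun a => pvKey a == pvKey z) = (fun a => pvKey a == pvKey y) := by
        funext a; rw [hkey]
      rw [hpred, if_pos hz]
      simp [Nat.add_comm]
    · rw [if_neg hz] at h
      simp at h

theorem pvRunLen_drop (ys : List Int) (d : Nat) (hd : d < pvRunLen ys) :
    pvRunLen (ys.drop d) = pvRunLen ys - d := by
  induction d generalizing ys with
  | zero => simp
  | succ d ih =>
    cases ys with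
    | nil => simp [pvRunLen] at hd
    | cons y t =>
      have htail : pvRunLen t = pvRunLen (y :: t) - 1 := pvRunLen_tail y t (by omega)
      have := ih t (by omega)
      simp only [List.drop_succ_cons]
      omega

theorem take_length_takeWhile (l : List Int) (p : Int → Bool) :
    l.take (l.takeWhile p).length = l.takeWhile p := by
  conv_lhs => rw [← l.takeWhile_append_dropWhile (p := p)]
  rw [List.take_append]
  simp

theorem drop_length_takeWhile (l : List Int) (p : Int → Bool) :
    l.drop (l.takeWhile p).length = l.dropWhile p := by
  conv_lhs => rw [← l.takeWhile_append_dropWhile (p := p)]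
  rw [List.drop_append]
  simp

theorem pv_foldl_id {α β : Type} (l : List β) (f : α → β → α) (a : α)
    (h : ∀ x ∈ l, f a x = a) : l.foldl f a = a := by
  induction l with
  | nil => rfl
  | cons x l ih =>
    rw [List.foldl_cons, h x (by simp)]
    exact ih (fun y hy => h y (List.mem_cons_of_mem _ hy))


set_option maxHeartbeats 1000000 in
theorem inner_loop_eq (lst : List Int) (t : Nat) (res : List Int) (ht : t ≤ lst.length) :
    (PySem.List.pyRange (t : Int) (lst.length : Int) 1).foldl
        (fun result j =>
          let considered := PySem.List.slice lst (some (t : Int)) (some (j + 1))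
          if is_all_same_bin considered then
            if considered.length > result.length then considered else result
          else result) res
      = pvF (lst.drop t) res := by
  rw [PySem.List.pyRange_one, List.foldl_map]
  have hslice : ∀ k : Nat, PySem.List.slice lst (some (t : Int)) (some ((t : Int) + (k : Int) + 1))
      = (lst.drop t).take (k + 1) := by
    intro k
    have hcast : ((t : Int) + (k : Int) + 1) = ((t : Int) + ((k + 1 : Nat) : Int)) := by push_cast; ring
    rw [hcast, PySem.List.slice_natCast_add]
  have hM : (((lst.length : Int)) - (t : Int)).toNat = (lst.drop t).length := by
    rw [List.length_drop]; omega
  rw [hM]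
  have key := inner_fold_eq (lst.drop t) res (lst.drop t).length le_rfl
  rw [Nat.min_eq_right (pvRunLen_le _)] at key
  have hfun : (fun (x : List Int) (y : Nat) =>
      let considered := PySem.List.slice lst (some (t : Int)) (some ((t : Int) + (y : Int) + 1));
      if is_all_same_bin considered = true then
        if considered.length > x.length then considered else x
      else x)
      = fun res k => pvStep (List.take (k + 1) (List.drop t lst)) res := by
    funext x y
    simp only [hslice, pvStep]
  rw [hfun, key, pvF]

theorem outer_fold_eq (lst : List Int) (fuel : Nat) :
    ∀ (t : Nat) (res : List Int), t ≤ lst.length → lst.length - t ≤ fuel →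
    (PySem.List.pyRange (t : Int) (lst.length : Int) 1).foldl
        (fun res i => pvF (lst.drop i.toNat) res) res
      = pvScan res (lst.drop t) := by
  induction fuel with
  | zero =>
    intro t res ht hf
    have : t = lst.length := by omega
    subst this
    rw [PySem.List.pyRange_one_eq_nil (by omega)]
    simp [pvScan]
  | succ fuel ih =>
    intro t res ht hf
    by_cases hlt : t < lst.length
    · cases hys : lst.drop t with
      | nil =>
        have := List.length_drop (l := lst) (i := t)
        rw [hys] at this
        simp at this
        omega
      | cons x xs =>
        have hr1 : 1 ≤ pvRunLen (lst.drop t) := by rw [hys]; simp [pvRunLen]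
        have hrle : pvRunLen (lst.drop t) ≤ lst.length - t := by
          have := pvRunLen_le (lst.drop t)
          rwa [List.length_drop] at this
        set r := pvRunLen (lst.drop t) with hrdef
        rw [PySem.List.pyRange_one_append (t : Int) ((t + r : Nat) : Int) (lst.length : Int)
          (by push_cast; omega) (by push_cast; omega), List.foldl_append,
          PySem.List.pyRange_one_cons (by push_cast; omega), List.foldl_cons]
        have e0 : ((t : Int)).toNat = t := by omega
        rw [e0]
        set res1 := pvF (lst.drop t) res with hres1
        have hres1len : r ≤ res1.length := by
          rw [hres1, pvF]
          split_ifs with h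
          · rw [List.length_take, List.length_drop]; omega
          · omega
        have hmid : (PySem.List.pyRange ((t : Int) + 1) ((t + r : Nat) : Int) 1).foldl
            (fun res i => pvF (lst.drop i.toNat) res) res1 = res1 := by
          apply pv_foldl_id
          intro i hi
          rw [PySem.List.mem_pyRange_one] at hi
          obtain ⟨d, hd1, hd2, hd3⟩ : ∃ d : Nat, i.toNat = t + d ∧ 1 ≤ d ∧ d < r := by
            refine ⟨i.toNat - t, by omega, by omega, by push_cast at hi; omega⟩
          rw [hd1, ← List.drop_drop]
          rw [pvF, if_neg]
          rw [pvRunLen_drop _ d (by omega)]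
          omega
        rw [hmid, ih (t + r) res1 (by omega) (by omega)]
        have hw : (xs.takeWhile (fun y => pvKey y == pvKey x)).length = r - 1 := by
          have : pvRunLen (lst.drop t) = 1 + (xs.takeWhile (fun y => pvKey y == pvKey x)).length := by
            rw [hys]; rfl
          omega
        rw [pvScan, pvTakeRun_eq]
        simp only
        have harg1 : (x :: xs.takeWhile (fun y => pvKey y == pvKey x)) = (lst.drop t).take r := by
          rw [hys]
          obtain ⟨w, hwr⟩ : ∃ w, r = w + 1 := ⟨r - 1, by omega⟩
          rw [hwr, List.take_succ_cons]
          rw [show w = (xs.takeWhile (fun y => pvKey y == pvKey x)).length by omega]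
          rw [take_length_takeWhile]
        have harg2 : xs.dropWhile (fun y => pvKey y == pvKey x) = lst.drop (t + r) := by
          rw [← List.drop_drop, hys]
          obtain ⟨w, hwr⟩ : ∃ w, r = w + 1 := ⟨r - 1, by omega⟩
          rw [hwr, List.drop_succ_cons]
          rw [show w = (xs.takeWhile (fun y => pvKey y == pvKey x)).length by omega]
          rw [drop_length_takeWhile]
        have hlen : (x :: xs.takeWhile (fun y => pvKey y == pvKey x)).length = r := by
          simp [hw]; omega
        have hbest : (if (x :: xs.takeWhile (fun y => pvKey y == pvKey x)).length > res.length
            then x :: xs.takeWhile (fun y => pvKey y == pvKey x) else res) = res1 := by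
          rw [hres1, pvF, ← hrdef, ← harg1, hlen]
        rw [harg2, hbest]
    · have : t = lst.length := by omega
      subst this
      rw [PySem.List.pyRange_one_eq_nil (by omega)]
      simp [pvScan]

-- ===== VERDICT (by name: the statement is the Claim_ definition above) =====
theorem get_longest_sublist_same_bin_spec : Claim_equal_get_longest_sublist_same_bin := by
  intro lst _
  unfold Spec_get_longest_sublist_same_bin
  unfold get_longest_sublist_same_bin get_longest_sublist_same_bin_alt
  rw [PySem.List.foldl_congr_mem _ _ (fun res i => pvF (lst.drop i.toNat) res) _ ?_]
  · have h0 : ((0 : Int)) = ((0 : Nat) : Int) := by norm_num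
    rw [h0, outer_fold_eq lst lst.length 0 [] (by omega) (by omega)]
    simp
  · intro acc i hi
    rw [PySem.List.mem_pyRange_one] at hi
    obtain ⟨t, rfl⟩ : ∃ t : Nat, i = (t : Int) := ⟨i.toNat, by omega⟩
    have ht : t ≤ lst.length := by exact_mod_cast hi.2.le
    have := inner_loop_eq lst t acc ht
    simp only [Int.toNat_natCast]
    exact this
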